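-- pv_equiv track=rewrite | github.com/NEZuko1337/coursework | src/algorithm/algorithm.py | optimize_investments
-- ===== SOURCE A (Python) =====
-- def get_profit(profits, investments, e, x):
--     """
--     Получает прибыль, если вложить x млн в e-е предприятие.
--
--     Args:
--         profits (list): Матрица прибылей
--         investments (list): Список возможных сумм инвестиций
--         e (int): Индекс предприятия (0..num_enterprises-1)
--         x (int): Сумма инвестиций (например, 10, 20, 30...)
--
--     Returns:
--         float: Прибыль от инвестиции x в предприятие e
--     """
--     # Находим индекс i, где investments[i] == x
--     i = investments.index(x)
--     return profits[i][e]
--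
-- def optimize_investments(investments, profits):
--     """
--     Оптимизирует распределение инвестиций между предприятиями с использованием
--     динамического программирования.
--
--     Args:
--         investments (list): Список возможных сумм инвестиций
--         profits (list): Матрица прибылей для каждого предприятия
--
--     Returns:
--         tuple: (max_profit, distribution) где:
--             - max_profit: максимальная суммарная прибыль
--             - distribution: список распределения инвестиций по предприятиям
--     """
--     # Сколько всего предприятий и уровней инвестиций
--     num_enterprises = len(profits[0])
--     num_invest_levels = len(investments)
--
--     # Инициализация матриц DP и выбора
--     dp = [[0] * (num_invest_levels) for _ in range(num_enterprises + 1)]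
--     choice = [[0] * (num_invest_levels) for _ in range(num_enterprises + 1)]
--
--     # Заполняем DP
--     for i in range(1, num_enterprises + 1):
--         # i - количество предприятий, которые учитываем (1..num_enterprises)
--         for j in range(num_invest_levels):
--             # j - индекс возможного уровня инвестиций (0..num_invest_levels-1)
--             best_profit = 0
--             best_k = 0
--
--             # Перебираем, сколько вложить в текущее предприятие i-1 (по индексу e = i-1)
--             for k in range(j + 1):
--                 # k пробегает от 0 до j, это индекс уровня инвестиций в предприятие i-1
--                 invest_in_this = investments[k]  # например, 0,10,20,...
--                 # Остаток уходит на i-1 предприятий, и это dp[i-1][j-k]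
--                 current_profit = dp[i-1][j-k] + get_profit(profits, investments, i-1, invest_in_this)
--                 if current_profit > best_profit:
--                     best_profit = current_profit
--                     best_k = k
--             dp[i][j] = best_profit
--             choice[i][j] = best_k  # запоминаем, сколько вложили в i-ое (точнее индекс k)
--
--     # Максимальная прибыль
--     max_profit = dp[num_enterprises][num_invest_levels - 1]
--
--     # Восстановление решения
--     distribution = [0] * num_enterprises
--     remaining_j = num_invest_levels - 1  # начинаем с последнего уровня инвестиций
--     for i in range(num_enterprises, 0, -1):
--         # Смотрим, сколько вложили в i-е предприятие (индекс i-1)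
--         k = choice[i][remaining_j]  # индекс уровня инвестиций в i-е предприятие
--         invest_in_this = investments[k]
--         distribution[i - 1] = invest_in_this
--         # Оставшийся бюджет для предыдущих предприятий
--         remaining_j = remaining_j - k
--
--     return max_profit, distribution
-- ===== SOURCE B (Python) =====
-- def get_profit(profits, investments, e, x):
--     i = investments.index(x)
--     return profits[i][e]
--
-- def optimize_investments(investments, profits):
--     # Top-down memoized recursion over (enterprises considered, investment-level index),
--     # instead of A's bottom-up table fill; same recurrence and tie-breaking.
--     num_enterprises = len(profits[0])
--     num_invest_levels = len(investments)
--     memo = {}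
--
--     def solve(i, j):
--         """Best (profit, chosen k) for first i enterprises at level index j."""
--         if i == 0:
--             return (0, 0)
--         if (i, j) in memo:
--             return memo[(i, j)]
--         best_profit = 0
--         best_k = 0
--         for k in range(j + 1):
--             current = solve(i - 1, j - k)[0] + get_profit(profits, investments, i - 1, investments[k])
--             if current > best_profit:
--                 best_profit = current
--                 best_k = k
--         memo[(i, j)] = (best_profit, best_k)
--         return (best_profit, best_k)
--
--     max_profit = solve(num_enterprises, num_invest_levels - 1)[0]
--     rev = []
--     j = num_invest_levels - 1
--     for i in range(num_enterprises, 0, -1):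
--         k = solve(i, j)[1]
--         rev.append(investments[k])
--         j -= k
--     return max_profit, list(reversed(rev))
-- ===== Notes on version B (the rewrite author's own statement) =====
-- stated objective: alternative
-- what changed: Replaces A's bottom-up DP table fill (preallocated dp/choice matrices mutated by a triple loop, plus a choice-table walk for the distribution) with a top-down memoized recursion solve(i,j) over the same recurrence (dict memo keyed by (i,j), storing the winning k), reconstructing the distribution by re-querying the memoized solver backward and reversing.
import Mathlib
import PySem

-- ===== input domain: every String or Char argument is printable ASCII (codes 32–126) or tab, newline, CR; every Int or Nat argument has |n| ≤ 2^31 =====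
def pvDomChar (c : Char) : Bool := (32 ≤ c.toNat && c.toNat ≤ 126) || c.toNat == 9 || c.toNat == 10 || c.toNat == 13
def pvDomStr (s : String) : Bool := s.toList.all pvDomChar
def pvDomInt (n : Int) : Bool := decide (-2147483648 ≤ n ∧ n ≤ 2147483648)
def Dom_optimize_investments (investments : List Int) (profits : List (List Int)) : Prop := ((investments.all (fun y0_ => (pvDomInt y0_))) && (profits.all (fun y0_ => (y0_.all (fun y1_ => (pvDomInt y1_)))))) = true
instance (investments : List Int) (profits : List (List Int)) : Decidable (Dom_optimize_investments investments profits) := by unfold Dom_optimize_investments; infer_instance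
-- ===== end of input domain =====

-- B re-implements A's bottom-up DP table as a top-down memoized recursion (same recurrence,
-- same tie-breaking); equivalence of return values is proved on Pre_ below. Objective: alternative.

-- ===== PORT A =====
-- get_profit: i = investments.index(x); return profits[i][e]
def get_profitA (profits : List (List Int)) (investments : List Int) (e : Int) (x : Int) : Int :=
  let i : Int := (((PySem.List.index? investments x).getD 0 : Nat) : Int)
  PySem.List.pyGetD (PySem.List.pyGetD profits i []) e 0

def optimize_investments (investments : List Int) (profits : List (List Int)) : Int × List Int :=
  let num_enterprises : Nat := (PySem.List.pyGetD profits 0 []).length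
  let num_invest_levels : Nat := investments.length
  let dp0 : List (List Int) := List.replicate (num_enterprises + 1) (List.replicate num_invest_levels 0)
  let choice0 : List (List Int) := List.replicate (num_enterprises + 1) (List.replicate num_invest_levels 0)
  -- for i in range(1, num_enterprises + 1): for j in range(num_invest_levels): for k in range(j+1): …
  let tables :=
    (PySem.List.pyRange 1 ((num_enterprises : Int) + 1) 1).foldl (fun (st : List (List Int) × List (List Int)) i =>
      (PySem.List.pyRange 0 (num_invest_levels : Int) 1).foldl (fun (st : List (List Int) × List (List Int)) j =>
        let dp := st.1
        let choice := st.2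
        let best :=
          (PySem.List.pyRange 0 (j + 1) 1).foldl (fun (b : Int × Int) k =>
            let invest_in_this := PySem.List.pyGetD investments k 0
            let current_profit :=
              PySem.List.pyGetD (PySem.List.pyGetD dp (i - 1) []) (j - k) 0 +
                get_profitA profits investments (i - 1) invest_in_this
            if current_profit > b.1 then (current_profit, k) else b) (0, 0)
        (PySem.List.pySetD dp i (PySem.List.pySetD (PySem.List.pyGetD dp i []) j best.1),
         PySem.List.pySetD choice i (PySem.List.pySetD (PySem.List.pyGetD choice i []) j best.2))) st) (dp0, choice0)
  let max_profit :=
    PySem.List.pyGetD (PySem.List.pyGetD tables.1 (num_enterprises : Int) []) ((num_invest_levels : Int) - 1) 0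
  -- for i in range(num_enterprises, 0, -1): …
  let recon :=
    (PySem.List.pyRange (num_enterprises : Int) 0 (-1)).foldl (fun (st : List Int × Int) i =>
      let k := PySem.List.pyGetD (PySem.List.pyGetD tables.2 i []) st.2 0
      let invest_in_this := PySem.List.pyGetD investments k 0
      (PySem.List.pySetD st.1 (i - 1) invest_in_this, st.2 - k)) (List.replicate num_enterprises 0, (num_invest_levels : Int) - 1)
  (max_profit, recon.1)

-- ===== PORT B =====
-- get_profit is kept verbatim in B (Source B), so B's port carries its own copy
def get_profitB (profits : List (List Int)) (investments : List Int) (e : Int) (x : Int) : Int :=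
  let i : Int := (((PySem.List.index? investments x).getD 0 : Nat) : Int)
  PySem.List.pyGetD (PySem.List.pyGetD profits i []) e 0

-- solve(i, j) with the memo dict threaded through; returns ((best_profit, best_k), memo)
def solveB (investments : List Int) (profits : List (List Int)) :
    Nat → Int → PySem.Dict (Int × Int) (Int × Int) → (Int × Int) × PySem.Dict (Int × Int) (Int × Int)
  | 0, _, memo => ((0, 0), memo)
  | i + 1, j, memo =>
    match memo.get? ((i : Int) + 1, j) with
    | some v => (v, memo)
    | none =>
      let s :=
        (PySem.List.pyRange 0 (j + 1) 1).foldl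
          (fun (st : Int × Int × PySem.Dict (Int × Int) (Int × Int)) k =>
            let r := solveB investments profits i (j - k) st.2.2
            let current := r.1.1 + get_profitB profits investments (i : Int) (PySem.List.pyGetD investments k 0)
            if current > st.1 then (current, k, r.2) else (st.1, st.2.1, r.2))
          (0, 0, memo)
      ((s.1, s.2.1), s.2.2.insert ((i : Int) + 1, j) (s.1, s.2.1))

def optimize_investments_alt (investments : List Int) (profits : List (List Int)) : Int × List Int :=
  let num_enterprises : Nat := (PySem.List.pyGetD profits 0 []).length
  let L : Int := (investments.length : Int)
  let r0 := solveB investments profits num_enterprises (L - 1) PySem.Dict.empty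
  let max_profit := r0.1.1
  -- for i in range(num_enterprises, 0, -1): rev.append(investments[solve(i, j)[1]]); j -= k
  let s :=
    (PySem.List.pyRange (num_enterprises : Int) 0 (-1)).foldl
      (fun (st : List Int × Int × PySem.Dict (Int × Int) (Int × Int)) i =>
        let r := solveB investments profits i.toNat st.2.1 st.2.2
        let k := r.1.2
        (st.1 ++ [PySem.List.pyGetD investments k 0], st.2.1 - k, r.2))
      ([], L - 1, r0.2)
  (max_profit, s.1.reverse)

-- ===== PRECONDITION & SPEC =====
-- Pre_ = exactly the inputs on which Python A returns: investments and profits nonempty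
-- (else IndexError), and — unless profits[0] is empty, when no profit is ever read — for every
-- investment value, the row of profits at its FIRST index in investments exists and has at
-- least len(profits[0]) entries (else get_profit's profits[i][e] raises IndexError).
def Pre_optimize_investments (investments : List Int) (profits : List (List Int)) : Prop :=
  investments ≠ [] ∧ profits ≠ [] ∧
    ((profits.headD []) = [] ∨
      ∀ x ∈ investments, ∀ r : Nat, PySem.List.index? investments x = some r →
        r < profits.length ∧ (profits.headD []).length ≤ (profits.getD r []).length)
instance (investments : List Int) (profits : List (List Int)) : Decidable (Pre_optimize_investments investments profits) := by unfold Pre_optimize_investments; infer_instance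

def pvWitness_optimize_investments : List Int × List (List Int) :=
  ([0, 10, 20], [[0, 0], [3, 1], [4, 5]])

def Spec_optimize_investments (investments : List Int) (profits : List (List Int)) (out : Int × List Int) : Prop := out = optimize_investments_alt investments profits
instance (investments : List Int) (profits : List (List Int)) (out : Int × List Int) : Decidable (Spec_optimize_investments investments profits out) := by unfold Spec_optimize_investments; infer_instance

-- ===== CLAIM (what is proved, stated in full; the proofs are below) =====
def Claim_equal_optimize_investments : Prop := ∀ (investments : List Int) (profits : List (List Int)), Dom_optimize_investments investments profits → Pre_optimize_investments investments profits → Spec_optimize_investments investments profits (optimize_investments investments profits)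

-- ===== LEMMAS AND PROOFS =====

-- the common profit term: get_profit(profits, investments, e, investments[k])
def gpF (I : List Int) (P : List (List Int)) (e : Int) (k : Int) : Int :=
  get_profitA P I e (PySem.List.pyGetD I k 0)

-- the DP recurrence: bothF i j = (dp[i][j], choice[i][j])
def bothF (I : List Int) (P : List (List Int)) : Nat → Int → Int × Int
  | 0, _ => (0, 0)
  | i + 1, j =>
      (PySem.List.pyRange 0 (j + 1) 1).foldl
        (fun (b : Int × Int) k =>
          let c := (bothF I P i (j - k)).1 + gpF I P (i : Int) k
          if c > b.1 then (c, k) else b) (0, 0)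

-- the reconstructed distribution for the first i enterprises at level index j
def reconF (I : List Int) (P : List (List Int)) : Nat → Int → List Int
  | 0, _ => []
  | i + 1, j =>
      let k := (bothF I P (i + 1) j).2
      reconF I P i (j - k) ++ [PySem.List.pyGetD I k 0]

theorem get_profitB_eq (P : List (List Int)) (I : List Int) (e x : Int) :
    get_profitB P I e x = get_profitA P I e x := rfl

-- coherence of the memo dict: every stored entry is the recurrence's value
def CohB (I : List Int) (P : List (List Int)) (memo : PySem.Dict (Int × Int) (Int × Int)) : Prop :=
  ∀ p v, memo.get? p = some v → ∃ a : Nat, p.1 = (a : Int) + 1 ∧ v = bothF I P (a + 1) p.2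

theorem solveB_spec (I : List Int) (P : List (List Int)) :
    ∀ (i : Nat) (j : Int) (memo : PySem.Dict (Int × Int) (Int × Int)), CohB I P memo →
      (solveB I P i j memo).1 = bothF I P i j ∧ CohB I P (solveB I P i j memo).2 := by
  intro i
  induction i with
  | zero =>
      intro j memo h
      exact ⟨rfl, h⟩
  | succ i ih =>
      intro j memo h
      cases hm : memo.get? ((i : Int) + 1, j) with
      | some v =>
          obtain ⟨a, ha, hv⟩ := h _ _ hm
          have haa : a = i := by omega
          subst haa
          simp only [solveB, hm]
          exact ⟨hv, h⟩
      | none =>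
          have fold : ∀ (ks : List Int) (bp bk : Int)
              (m : PySem.Dict (Int × Int) (Int × Int)), CohB I P m →
              (let F := ks.foldl
                (fun (st : Int × Int × PySem.Dict (Int × Int) (Int × Int)) k =>
                  let r := solveB I P i (j - k) st.2.2
                  let current := r.1.1 + get_profitB P I (i : Int) (PySem.List.pyGetD I k 0)
                  if current > st.1 then (current, k, r.2) else (st.1, st.2.1, r.2))
                (bp, bk, m)
               (F.1, F.2.1) = ks.foldl
                (fun (b : Int × Int) k =>
                  let c := (bothF I P i (j - k)).1 + gpF I P (i : Int) k
                  if c > b.1 then (c, k) else b) (bp, bk) ∧ CohB I P F.2.2) := by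
            intro ks
            induction ks with
            | nil => intro bp bk m hme; exact ⟨rfl, hme⟩
            | cons k ks ihk =>
                intro bp bk m hme
                obtain ⟨hv, hc⟩ := ih (j - k) m hme
                simp only [List.foldl_cons, get_profitB_eq, gpF, hv]
                by_cases hgt : (bothF I P i (j - k)).1 + get_profitA P I (i : Int) (PySem.List.pyGetD I k 0) > bp
                · simp only [if_pos hgt]
                  exact ihk _ _ _ hc
                · simp only [if_neg hgt]
                  exact ihk _ _ _ hc
          obtain ⟨he, hc⟩ := fold (PySem.List.pyRange 0 (j + 1) 1) 0 0 memo h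
          simp only [solveB, hm]
          constructor
          · show (_, _) = bothF I P (i + 1) j
            rw [bothF]
            exact he
          · intro p v hg
            by_cases hp : p = ((i : Int) + 1, j)
            · subst hp
              rw [PySem.Dict.get?_insert_self] at hg
              refine ⟨i, rfl, ?_⟩
              cases hg
              rw [bothF]
              exact he.symm ▸ rfl
            · rw [PySem.Dict.get?_insert_of_ne _ _ hp] at hg
              exact hc _ _ hg


theorem CohB_empty (I : List Int) (P : List (List Int)) : CohB I P PySem.Dict.empty := by
  intro p v hg
  rw [PySem.Dict.get?_empty] at hg
  exact absurd hg (by simp)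

theorem altRecon (I : List Int) (P : List (List Int)) :
    ∀ (i : Nat) (j : Int) (acc : List Int) (memo : PySem.Dict (Int × Int) (Int × Int)),
      CohB I P memo →
      ((PySem.List.pyRange (i : Int) 0 (-1)).foldl
        (fun (st : List Int × Int × PySem.Dict (Int × Int) (Int × Int)) ii =>
          let r := solveB I P ii.toNat st.2.1 st.2.2
          let k := r.1.2
          (st.1 ++ [PySem.List.pyGetD I k 0], st.2.1 - k, r.2)) (acc, j, memo)).1
      = acc ++ (reconF I P i j).reverse := by
  intro i
  induction i with
  | zero =>
      intro j acc memo _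
      rw [PySem.List.pyRange_neg_one_eq_nil (by simp)]
      simp [reconF]
  | succ i ih =>
      intro j acc memo h
      rw [PySem.List.pyRange_neg_one_cons (by exact_mod_cast Nat.succ_pos i)]
      have hcast : ((i + 1 : Nat) : Int) - 1 = (i : Int) := by push_cast; ring
      rw [List.foldl_cons]
      obtain ⟨hv, hc⟩ := solveB_spec I P (i + 1) j memo h
      simp only [hcast, Int.toNat_natCast, hv]
      have := ih (j - (bothF I P (i + 1) j).2)
        (acc ++ [PySem.List.pyGetD I (bothF I P (i + 1) j).2 0]) _ hc
      rw [this]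
      show _ = acc ++ (reconF I P (i + 1) j).reverse
      rw [reconF]
      simp

theorem alt_eq (I : List Int) (P : List (List Int)) :
    optimize_investments_alt I P =
      ((bothF I P (PySem.List.pyGetD P 0 []).length ((I.length : Int) - 1)).1,
       reconF I P (PySem.List.pyGetD P 0 []).length ((I.length : Int) - 1)) := by
  obtain ⟨hv, hc⟩ := solveB_spec I P (PySem.List.pyGetD P 0 []).length ((I.length : Int) - 1)
    PySem.Dict.empty (CohB_empty I P)
  show (_, _) = _
  rw [altRecon I P _ _ [] _ hc, hv]
  simp


-- ---------- A side ----------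

theorem getD_set_lem {α : Type} (l : List α) (n : Nat) (v : α) (r : Nat) (hn : n < l.length) (d : α) :
    (l.set n v).getD r d = if r = n then v else l.getD r d := by
  by_cases h : r = n
  · subst h; simp [List.getD, hn]
  · simp [List.getD, Ne.symm h, h]

theorem drop_set_cons {α : Type} (l : List α) (i : Nat) (hi : i < l.length) (a : α) :
    (l.set i a).drop i = a :: l.drop (i + 1) := by
  rw [List.drop_eq_getElem_cons (by simpa using hi)]
  simp [List.drop_set]

theorem bothF_k_bounds (I : List Int) (P : List (List Int)) :
    ∀ (i : Nat) (j : Int), 0 ≤ j → 0 ≤ (bothF I P i j).2 ∧ (bothF I P i j).2 ≤ j := by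
  intro i j hj
  cases i with
  | zero => simpa [bothF] using hj
  | succ i =>
      rw [bothF]
      have aux : ∀ (ks : List Int), (∀ k ∈ ks, 0 ≤ k ∧ k ≤ j) → ∀ (b : Int × Int), 0 ≤ b.2 → b.2 ≤ j →
          0 ≤ ((ks.foldl (fun (b : Int × Int) k =>
              let c := (bothF I P i (j - k)).1 + gpF I P (i : Int) k
              if c > b.1 then (c, k) else b) b)).2 ∧
          ((ks.foldl (fun (b : Int × Int) k =>
              let c := (bothF I P i (j - k)).1 + gpF I P (i : Int) k
              if c > b.1 then (c, k) else b) b)).2 ≤ j := by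
        intro ks
        induction ks with
        | nil => intro _ b h1 h2; exact ⟨h1, h2⟩
        | cons k ks ihk =>
            intro hmem b h1 h2
            obtain ⟨hk1, hk2⟩ := hmem k (by simp)
            simp only [List.foldl_cons]
            by_cases hc : (bothF I P i (j - k)).1 + gpF I P (i : Int) k > b.1
            · simp only [if_pos hc]
              exact ihk (fun k hk => hmem k (by simp [hk])) _ hk1 hk2
            · simp only [if_neg hc]
              exact ihk (fun k hk => hmem k (by simp [hk])) _ h1 h2
      refine aux _ ?_ (0, 0) le_rfl hj
      intro k hk
      rw [PySem.List.mem_pyRange_one] at hk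
      omega

-- invariant on A's tables while filling row i: rows < i are done, row i is done on indices < m
def TROW (I : List Int) (P : List (List Int)) (i m : Nat) (dp ch : List (List Int)) : Prop :=
  dp.length = (PySem.List.pyGetD P 0 []).length + 1 ∧
  ch.length = (PySem.List.pyGetD P 0 []).length + 1 ∧
  (∀ r : Nat, r ≤ (PySem.List.pyGetD P 0 []).length →
    (dp.getD r []).length = I.length ∧ (ch.getD r []).length = I.length) ∧
  (∀ r : Nat, r ≤ (PySem.List.pyGetD P 0 []).length → ∀ jj : Int, 0 ≤ jj → jj < (I.length : Int) →
    PySem.List.pyGetD (dp.getD r []) jj 0 =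
      (if r < i ∨ (r = i ∧ jj < (m : Int)) then (bothF I P r jj).1 else 0) ∧
    PySem.List.pyGetD (ch.getD r []) jj 0 =
      (if r < i ∨ (r = i ∧ jj < (m : Int)) then (bothF I P r jj).2 else 0))

theorem getD_replicate_lem {α : Type} (n : Nat) (x : α) (r : Nat) (hr : r < n) (d : α) :
    (List.replicate n x).getD r d = x := by
  simp [List.getD, hr]

theorem pyGetD_replicate (n : Nat) (jj : Int) : PySem.List.pyGetD (List.replicate n (0 : Int)) jj 0 = 0 := by
  simp only [PySem.List.pyGetD, PySem.List.pyGet?]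
  cases h' : (PySem.List.pyIdx? n jj) with
  | none => simp [h']
  | some a =>
      rw [show (List.replicate n (0:Int)).length = n from by simp, h']
      simp only [Option.bind_some, List.getElem?_replicate]
      split_ifs <;> simp

theorem trow_init (I : List Int) (P : List (List Int)) :
    TROW I P 1 0
      (List.replicate ((PySem.List.pyGetD P 0 []).length + 1) (List.replicate I.length (0 : Int)))
      (List.replicate ((PySem.List.pyGetD P 0 []).length + 1) (List.replicate I.length (0 : Int))) := by
  refine ⟨by simp, by simp, ?_, ?_⟩
  · intro r hr
    constructor <;> · rw [getD_replicate_lem _ _ _ (by omega)]; simp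
  · intro r hr jj h0 hL
    rw [getD_replicate_lem _ _ _ (by omega)]
    have hz := pyGetD_replicate I.length jj
    refine ⟨?_, ?_⟩ <;>
      · rw [hz]
        have : ¬ (r < 1 ∨ (r = 1 ∧ jj < ((0 : Nat) : Int))) ∨ (r = 0) := by omega
        rcases this with h | h
        · rw [if_neg h]
        · subst h
          by_cases hq : (0 < 1 ∨ ((0 : Nat) = 1 ∧ jj < ((0 : Nat) : Int)))
          · rw [if_pos hq]; simp [bothF]
          · rw [if_neg hq]


-- A's inner-loop body as a named function (alpha-equal to the lambda in the port)
def innerF (I : List Int) (P : List (List Int)) (i : Int) :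
    (List (List Int) × List (List Int)) → Int → (List (List Int) × List (List Int)) :=
  fun st j =>
    let dp := st.1
    let choice := st.2
    let best := (PySem.List.pyRange 0 (j + 1) 1).foldl (fun (b : Int × Int) k =>
        let invest_in_this := PySem.List.pyGetD I k 0
        let current_profit := PySem.List.pyGetD (PySem.List.pyGetD dp (i - 1) []) (j - k) 0 +
            get_profitA P I (i - 1) invest_in_this
        if current_profit > b.1 then (current_profit, k) else b) (0, 0)
    (PySem.List.pySetD dp i (PySem.List.pySetD (PySem.List.pyGetD dp i []) j best.1),
     PySem.List.pySetD choice i (PySem.List.pySetD (PySem.List.pyGetD choice i []) j best.2))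

theorem inner_step (I : List Int) (P : List (List Int)) (e m : Nat)
    (he : e + 1 ≤ (PySem.List.pyGetD P 0 []).length) (hm : m < I.length)
    (i : Int) (hi : i = (e : Int) + 1) (dp ch : List (List Int))
    (h : TROW I P (e + 1) m dp ch) :
    TROW I P (e + 1) (m + 1) (innerF I P i (dp, ch) (m : Int)).1 (innerF I P i (dp, ch) (m : Int)).2 := by
  obtain ⟨hdl, hcl, hlen, hval⟩ := h
  have hbest : ((PySem.List.pyRange 0 ((m : Int) + 1) 1).foldl (fun (b : Int × Int) k =>
        let invest_in_this := PySem.List.pyGetD I k 0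
        let current_profit := PySem.List.pyGetD (PySem.List.pyGetD dp (i - 1) []) ((m : Int) - k) 0 +
            get_profitA P I (i - 1) invest_in_this
        if current_profit > b.1 then (current_profit, k) else b) (0, 0))
      = bothF I P (e + 1) (m : Int) := by
    rw [bothF]
    apply PySem.List.foldl_congr_mem
    intro acc k hk
    rw [PySem.List.mem_pyRange_one] at hk
    have hread : PySem.List.pyGetD (PySem.List.pyGetD dp ((e : Int)) []) ((m : Int) - k) 0
        = (bothF I P e ((m : Int) - k)).1 := by
      rw [PySem.List.pyGetD_natCast]
      have := (hval e (by omega) ((m : Int) - k) (by omega) (by omega)).1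
      rw [this, if_pos (by left; omega)]
    simp only [hi, show (e : Int) + 1 - 1 = ((e : Nat) : Int) from by ring, gpF, hread]
  have hcast : i = ((e + 1 : Nat) : Int) := by push_cast; omega
  have hset : ∀ (t : List (List Int)), t.length = (PySem.List.pyGetD P 0 []).length + 1 →
      ∀ (v : List Int) (r : Nat), r ≤ (PySem.List.pyGetD P 0 []).length →
      ((PySem.List.pySetD t i v).getD r []) = if r = e + 1 then v else t.getD r [] := by
    intro t ht v r hr
    rw [hcast, PySem.List.pySetD_natCast]
    exact getD_set_lem t (e + 1) v r (by omega) []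
  have hgetrow : ∀ (t : List (List Int)), PySem.List.pyGetD t i [] = t.getD (e + 1) [] := by
    intro t; rw [hcast, PySem.List.pyGetD_natCast]
  have hrowval : ∀ (row : List Int), row.length = I.length →
      ∀ (b : Int) (jj : Int), 0 ≤ jj → jj < (I.length : Int) →
      PySem.List.pyGetD (PySem.List.pySetD row (m : Int) b) jj 0 =
        if jj = (m : Int) then b else PySem.List.pyGetD row jj 0 := by
    intro row hrow b jj h0 hL
    rw [PySem.List.pySetD_natCast]
    rw [PySem.List.pyGetD_eq_getElem _ 0 (by omega) (by simp [hrow]; omega)]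
    rw [List.getElem_set]
    by_cases hjm : jj = (m : Int)
    · rw [if_pos hjm, if_pos (by omega)]
    · rw [if_neg hjm, if_neg (by omega)]
      rw [PySem.List.pyGetD_eq_getElem _ 0 (by omega) (by omega)]
  show TROW I P (e + 1) (m + 1)
    (PySem.List.pySetD dp i (PySem.List.pySetD (PySem.List.pyGetD dp i []) (m : Int) _))
    (PySem.List.pySetD ch i (PySem.List.pySetD (PySem.List.pyGetD ch i []) (m : Int) _))
  refine ⟨by rw [hcast]; simp [hdl], by rw [hcast]; simp [hcl], ?_, ?_⟩
  · intro r hr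
    rw [hset dp hdl _ r hr, hset ch hcl _ r hr]
    by_cases hre : r = e + 1
    · rw [if_pos hre, if_pos hre]
      refine ⟨?_, ?_⟩
      · rw [hgetrow, PySem.List.pySetD_natCast, List.length_set]
        exact (hlen (e + 1) he).1
      · rw [hgetrow, PySem.List.pySetD_natCast, List.length_set]
        exact (hlen (e + 1) he).2
    · rw [if_neg hre, if_neg hre]
      exact hlen r hr
  · intro r hr jj h0 hL
    rw [hset dp hdl _ r hr, hset ch hcl _ r hr]
    by_cases hre : r = e + 1
    · subst hre
      rw [if_pos rfl, if_pos rfl, hgetrow dp, hgetrow ch]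
      rw [hrowval _ (hlen (e + 1) he).1 _ jj h0 hL, hrowval _ (hlen (e + 1) he).2 _ jj h0 hL]
      by_cases hjm : jj = (m : Int)
      · rw [if_pos hjm, if_pos hjm, if_pos (by right; exact ⟨rfl, by push_cast; omega⟩),
            if_pos (by right; exact ⟨rfl, by push_cast; omega⟩), hjm, hbest]
        exact ⟨rfl, rfl⟩
      · rw [if_neg hjm, if_neg hjm]
        have h1 := (hval (e + 1) hr jj h0 hL).1
        have h2 := (hval (e + 1) hr jj h0 hL).2
        rw [h1, h2]
        have hiff : ((e + 1 < e + 1 ∨ (e + 1 = e + 1 ∧ jj < (m : Int)))) ↔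
            ((e + 1 < e + 1 ∨ (e + 1 = e + 1 ∧ jj < ((m + 1 : Nat) : Int)))) := by
          constructor
          · rintro (h | ⟨_, h⟩); · omega
            right; exact ⟨rfl, by push_cast; omega⟩
          · rintro (h | ⟨_, h⟩); · omega
            right; refine ⟨rfl, ?_⟩; push_cast at h ⊢; omega
        constructor
        · by_cases hc : (e + 1 < e + 1 ∨ (e + 1 = e + 1 ∧ jj < (m : Int)))
          · rw [if_pos hc, if_pos (hiff.mp hc)]
          · rw [if_neg hc, if_neg (fun hx => hc (hiff.mpr hx))]
        · by_cases hc : (e + 1 < e + 1 ∨ (e + 1 = e + 1 ∧ jj < (m : Int)))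
          · rw [if_pos hc, if_pos (hiff.mp hc)]
          · rw [if_neg hc, if_neg (fun hx => hc (hiff.mpr hx))]
    · rw [if_neg hre, if_neg hre]
      have h1 := (hval r hr jj h0 hL).1
      have h2 := (hval r hr jj h0 hL).2
      rw [h1, h2]
      have hiff : ((r < e + 1 ∨ (r = e + 1 ∧ jj < (m : Int)))) ↔
          ((r < e + 1 ∨ (r = e + 1 ∧ jj < ((m + 1 : Nat) : Int)))) := by
        constructor
        · rintro (h | ⟨h, _⟩); · omega
          exact absurd h hre
        · rintro (h | ⟨h, _⟩); · omega
          exact absurd h hre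
      constructor
      · by_cases hc : (r < e + 1 ∨ (r = e + 1 ∧ jj < (m : Int)))
        · rw [if_pos hc, if_pos (hiff.mp hc)]
        · rw [if_neg hc, if_neg (fun hx => hc (hiff.mpr hx))]
      · by_cases hc : (r < e + 1 ∨ (r = e + 1 ∧ jj < (m : Int)))
        · rw [if_pos hc, if_pos (hiff.mp hc)]
        · rw [if_neg hc, if_neg (fun hx => hc (hiff.mpr hx))]


theorem inner_fold (I : List Int) (P : List (List Int)) (e : Nat)
    (he : e + 1 ≤ (PySem.List.pyGetD P 0 []).length) (i : Int) (hi : i = (e : Int) + 1) :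
    ∀ (c m : Nat), m + c = I.length → ∀ dp ch, TROW I P (e + 1) m dp ch →
      TROW I P (e + 1) I.length
        (((PySem.List.pyRange (m : Int) (I.length : Int) 1).foldl (innerF I P i) (dp, ch)).1)
        (((PySem.List.pyRange (m : Int) (I.length : Int) 1).foldl (innerF I P i) (dp, ch)).2) := by
  intro c
  induction c with
  | zero =>
      intro m hmc dp ch h
      rw [PySem.List.pyRange_one_eq_nil (by omega)]
      simpa [← hmc] using h
  | succ c ihc =>
      intro m hmc dp ch h
      rw [PySem.List.pyRange_one_cons (by omega), List.foldl_cons]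
      have hstep := inner_step I P e m he (by omega) i hi dp ch h
      have hcast : ((m : Int) + 1) = (((m + 1 : Nat)) : Int) := by push_cast; ring
      rw [hcast]
      have := ihc (m + 1) (by omega) (innerF I P i (dp, ch) (m : Int)).1 (innerF I P i (dp, ch) (m : Int)).2 hstep
      simpa using this

theorem trow_shift (I : List Int) (P : List (List Int)) (n : Nat) (dp ch : List (List Int))
    (h : TROW I P n I.length dp ch) : TROW I P (n + 1) 0 dp ch := by
  obtain ⟨h1, h2, h3, h4⟩ := h
  refine ⟨h1, h2, h3, ?_⟩
  intro r hr jj h0 hL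
  have := h4 r hr jj h0 hL
  have hiff : (r < n ∨ (r = n ∧ jj < (I.length : Int))) ↔
      (r < n + 1 ∨ (r = n + 1 ∧ jj < ((0 : Nat) : Int))) := by
    constructor
    · rintro (h | ⟨h, _⟩) <;> omega
    · rintro (h | ⟨_, h⟩)
      · rcases Nat.lt_succ_iff_lt_or_eq.mp h with h' | h'
        · left; exact h'
        · right; exact ⟨h', hL⟩
      · omega
  constructor
  · by_cases hc : (r < n ∨ (r = n ∧ jj < (I.length : Int)))
    · rw [this.1, if_pos hc, if_pos (hiff.mp hc)]
    · rw [this.1, if_neg hc, if_neg (fun hx => hc (hiff.mpr hx))]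
  · by_cases hc : (r < n ∨ (r = n ∧ jj < (I.length : Int)))
    · rw [this.2, if_pos hc, if_pos (hiff.mp hc)]
    · rw [this.2, if_neg hc, if_neg (fun hx => hc (hiff.mpr hx))]

theorem outer_fold (I : List Int) (P : List (List Int)) :
    ∀ (c e : Nat), e + c = (PySem.List.pyGetD P 0 []).length → ∀ dp ch,
      TROW I P (e + 1) 0 dp ch →
      TROW I P ((PySem.List.pyGetD P 0 []).length + 1) 0
        (((PySem.List.pyRange ((e : Int) + 1) (((PySem.List.pyGetD P 0 []).length : Int) + 1) 1).foldl
          (fun st i => (PySem.List.pyRange 0 (I.length : Int) 1).foldl (innerF I P i) st) (dp, ch)).1)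
        (((PySem.List.pyRange ((e : Int) + 1) (((PySem.List.pyGetD P 0 []).length : Int) + 1) 1).foldl
          (fun st i => (PySem.List.pyRange 0 (I.length : Int) 1).foldl (innerF I P i) st) (dp, ch)).2) := by
  intro c
  induction c with
  | zero =>
      intro e hec dp ch h
      rw [PySem.List.pyRange_one_eq_nil (a := (e : Int) + 1)
        (b := ((PySem.List.pyGetD P 0 []).length : Int) + 1) (by omega)]
      have : e + 1 = (PySem.List.pyGetD P 0 []).length + 1 := by omega
      rw [this] at h
      simpa using h
  | succ c ihc =>
      intro e hec dp ch h
      rw [PySem.List.pyRange_one_cons (a := (e : Int) + 1)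
        (b := ((PySem.List.pyGetD P 0 []).length : Int) + 1) (by omega), List.foldl_cons]
      have hin := inner_fold I P e (by omega) ((e : Int) + 1) rfl I.length 0 (by omega) dp ch h
      have hsh := trow_shift I P (e + 1) _ _ hin
      have hcast : ((e : Int) + 1 + 1) = (((e + 1 : Nat) : Int) + 1) := by push_cast; ring
      rw [hcast]
      have := ihc (e + 1) (by omega)
        (((PySem.List.pyRange 0 (I.length : Int) 1).foldl (innerF I P ((e : Int) + 1)) (dp, ch)).1)
        (((PySem.List.pyRange 0 (I.length : Int) 1).foldl (innerF I P ((e : Int) + 1)) (dp, ch)).2) hsh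
      simpa using this

-- the port, written with innerF (definitional unfolding)
theorem A_unfold (I : List Int) (P : List (List Int)) :
    optimize_investments I P =
      (let nE : Nat := (PySem.List.pyGetD P 0 []).length
       let t := (PySem.List.pyRange 1 ((nE : Int) + 1) 1).foldl
         (fun st i => (PySem.List.pyRange 0 (I.length : Int) 1).foldl (innerF I P i) st)
         (List.replicate (nE + 1) (List.replicate I.length (0 : Int)),
          List.replicate (nE + 1) (List.replicate I.length (0 : Int)))
       (PySem.List.pyGetD (PySem.List.pyGetD t.1 (nE : Int) []) ((I.length : Int) - 1) 0,
        ((PySem.List.pyRange (nE : Int) 0 (-1)).foldl (fun (st : List Int × Int) i =>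
          let k := PySem.List.pyGetD (PySem.List.pyGetD t.2 i []) st.2 0
          let invest_in_this := PySem.List.pyGetD I k 0
          (PySem.List.pySetD st.1 (i - 1) invest_in_this, st.2 - k)) (List.replicate nE 0, (I.length : Int) - 1)).1)) := rfl


theorem reconA (I : List Int) (P : List (List Int)) (ch : List (List Int))
    (hch : ∀ r : Nat, r ≤ (PySem.List.pyGetD P 0 []).length → ∀ jj : Int, 0 ≤ jj → jj < (I.length : Int) →
      PySem.List.pyGetD (ch.getD r []) jj 0 = (bothF I P r jj).2) :
    ∀ (i : Nat), i ≤ (PySem.List.pyGetD P 0 []).length → ∀ (dist : List Int) (j : Int),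
      i ≤ dist.length → 0 ≤ j → j < (I.length : Int) →
      ((PySem.List.pyRange (i : Int) 0 (-1)).foldl (fun (st : List Int × Int) ii =>
        let k := PySem.List.pyGetD (PySem.List.pyGetD ch ii []) st.2 0
        let invest_in_this := PySem.List.pyGetD I k 0
        (PySem.List.pySetD st.1 (ii - 1) invest_in_this, st.2 - k)) (dist, j)).1
      = reconF I P i j ++ dist.drop i := by
  intro i
  induction i with
  | zero =>
      intro _ dist j _ _ _
      rw [PySem.List.pyRange_neg_one_eq_nil (by simp)]
      simp [reconF]
  | succ i ih =>
      intro hi dist j hdist h0 hL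
      rw [PySem.List.pyRange_neg_one_cons (by exact_mod_cast Nat.succ_pos i), List.foldl_cons]
      have hk : PySem.List.pyGetD (PySem.List.pyGetD ch ((i + 1 : Nat) : Int) []) j 0
          = (bothF I P (i + 1) j).2 := by
        rw [PySem.List.pyGetD_natCast]
        exact hch (i + 1) hi j h0 hL
      obtain ⟨hk0, hkj⟩ := bothF_k_bounds I P (i + 1) j h0
      have hcast : ((i + 1 : Nat) : Int) - 1 = (i : Int) := by push_cast; ring
      simp only [hk, hcast]
      rw [PySem.List.pySetD_natCast]
      have ihres := ih (by omega)
        (dist.set i (PySem.List.pyGetD I (bothF I P (i + 1) j).2 0))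
        (j - (bothF I P (i + 1) j).2) (by simp; omega) (by omega) (by omega)
      rw [ihres]
      rw [drop_set_cons dist i (by omega)]
      rw [show reconF I P (i + 1) j = reconF I P i (j - (bothF I P (i + 1) j).2) ++
        [PySem.List.pyGetD I (bothF I P (i + 1) j).2 0] from by rw [reconF]]
      simp

theorem A_eq (I : List Int) (P : List (List Int)) (hI : I ≠ []) :
    optimize_investments I P =
      ((bothF I P (PySem.List.pyGetD P 0 []).length ((I.length : Int) - 1)).1,
       reconF I P (PySem.List.pyGetD P 0 []).length ((I.length : Int) - 1)) := by
  have hL : 1 ≤ I.length := List.length_pos_iff.mpr hI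
  have htab := outer_fold I P (PySem.List.pyGetD P 0 []).length 0 (by omega) _ _ (trow_init I P)
  simp only [Nat.cast_zero, zero_add] at htab
  obtain ⟨_, _, _, hval⟩ := htab
  rw [A_unfold]
  show (_, _) = (_, _)
  simp only [Prod.mk.injEq]
  refine ⟨?_, ?_⟩
  · rw [PySem.List.pyGetD_natCast]
    rw [(hval (PySem.List.pyGetD P 0 []).length le_rfl ((I.length : Int) - 1) (by omega) (by omega)).1]
    rw [if_pos (by left; omega)]
  · rw [reconA I P _
      (fun r hr jj h0 hjL => by
        rw [(hval r hr jj h0 hjL).2, if_pos (by left; omega)])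
      (PySem.List.pyGetD P 0 []).length le_rfl _ ((I.length : Int) - 1)
      (by simp) (by omega) (by omega)]
    simp

-- ===== VERDICT (by name: the statement is the Claim_ definition above) =====
theorem optimize_investments_spec : Claim_equal_optimize_investments := by
  intro I P _ hpre
  unfold Spec_optimize_investments
  obtain ⟨hI, -⟩ := hpre
  rw [A_eq I P hI, alt_eq I P]
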